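-- pv_equiv track=rewrite | github.com/zaqifathis/Python-code | FF_0_Boundary_Point_Detection.py | getGap
-- ===== SOURCE A (Python) =====
-- def getGap(angles):
--     angularGap = []
--
--     for i in range(0,len(angles) - 1):
--         gap = angles[i + 1] - angles[i]
--         angularGap.append(gap)
--
--     #add gap between first and last
--     first = angles[0] + 360
--     last = angles[len(angles) - 1]
--     gap2 = first - last
--     angularGap.append(gap2)
--
--     angularGap.sort(reverse=True)
--     return angularGap
-- ===== SOURCE B (Python) =====
-- def _insert_desc(lst, x):
--     """Insert x into the descending-sorted list lst, keeping it sorted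
--     (binary search for the position: past all elements >= x)."""
--     lo, hi = 0, len(lst)
--     while lo < hi:
--         mid = (lo + hi) // 2
--         if lst[mid] >= x:
--             lo = mid + 1
--         else:
--             hi = mid
--     lst.insert(lo, x)
--
--
-- def getGap(angles):
--     first = angles[0]
--     sorted_gaps = []
--     prev = None
--     for a in angles:
--         if prev is not None:
--             _insert_desc(sorted_gaps, a - prev)
--         prev = a
--     _insert_desc(sorted_gaps, first + 360 - prev)
--     return sorted_gaps
-- ===== Notes on version B (the rewrite author's own statement) =====
-- stated objective: alternative
-- what changed: B replaces A's collect-all-gaps-then-library-sort with an online insertion sort: one pass over the angles with a prev accumulator that binary-searches the position and inserts each gap (and finally the wrap-around gap) directly into a descending-sorted list, so no sort call and no index loop remain.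
import Mathlib
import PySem

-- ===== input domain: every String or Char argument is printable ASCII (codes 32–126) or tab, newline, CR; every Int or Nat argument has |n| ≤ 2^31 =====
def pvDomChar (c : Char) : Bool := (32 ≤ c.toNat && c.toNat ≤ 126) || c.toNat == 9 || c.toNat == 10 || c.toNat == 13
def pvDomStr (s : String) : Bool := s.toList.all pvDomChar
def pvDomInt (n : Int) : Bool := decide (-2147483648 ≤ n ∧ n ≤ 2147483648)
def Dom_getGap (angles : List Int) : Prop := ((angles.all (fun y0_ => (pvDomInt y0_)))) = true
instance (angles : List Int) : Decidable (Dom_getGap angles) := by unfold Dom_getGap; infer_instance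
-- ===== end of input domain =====

-- B is an online insertion sort: one pass with a prev accumulator inserting each gap
-- into a descending-sorted list, instead of A's collect-then-library-sort (objective: alternative).

-- ===== PORT A =====
def getGap (angles : List Int) : List Int :=
  let angularGap : List Int :=
    (PySem.List.pyRange 0 ((angles.length : Int) - 1) 1).foldl
      (fun acc i =>
        acc ++ [PySem.List.pyGetD angles (i + 1) 0 - PySem.List.pyGetD angles i 0]) []
  let first := PySem.List.pyGetD angles 0 0 + 360
  let last := PySem.List.pyGetD angles ((angles.length : Int) - 1) 0
  let angularGap := angularGap ++ [first - last]
  PySem.List.sorted angularGap (fun x => x) true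

-- ===== PORT B =====
-- the while loop of _insert_desc: binary search for the first position whose element is < x
-- (lst.getD mid 0 renders lst[mid]; mid is always in range here, so this is exact)
def bisectDesc (lst : List Int) (x : Int) (lo hi : Nat) : Nat :=
  if lo < hi then
    let mid := (lo + hi) / 2
    if x ≤ lst.getD mid 0 then bisectDesc lst x (mid + 1) hi
    else bisectDesc lst x lo mid
  else lo
termination_by hi - lo
decreasing_by all_goals omega

-- _insert_desc: lst.insert(lo, x) at the position found by the binary search
def insertDesc (x : Int) (lst : List Int) : List Int :=
  PySem.List.insert lst ((bisectDesc lst x 0 lst.length : Nat) : Int) x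

-- the loop body: state = (sorted_gaps, prev)
def bStep (st : List Int × Option Int) (a : Int) : List Int × Option Int :=
  match st.2 with
  | none => (st.1, some a)
  | some p => (insertDesc (a - p) st.1, some a)

def getGap_alt (angles : List Int) : List Int :=
  let first := PySem.List.pyGetD angles 0 0
  let st := angles.foldl bStep ([], none)
  insertDesc (first + 360 - st.2.getD 0) st.1

-- ===== PRECONDITION & SPEC =====
-- Pre_ excludes only the empty list, on which both Pythons raise (IndexError at angles[0]).
def Pre_getGap (angles : List Int) : Prop := angles ≠ []
instance (angles : List Int) : Decidable (Pre_getGap angles) := by unfold Pre_getGap; infer_instance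
def pvWitness_getGap : List Int := ([10, 90, 200])
def Spec_getGap (angles : List Int) (out : List Int) : Prop := out = getGap_alt angles
instance (angles : List Int) (out : List Int) : Decidable (Spec_getGap angles out) := by unfold Spec_getGap; infer_instance

-- ===== CLAIM (what is proved, stated in full; the proofs are below) =====
def Claim_equal_getGap : Prop := ∀ (angles : List Int), Dom_getGap angles → Pre_getGap angles → Spec_getGap angles (getGap angles)

-- ===== LEMMAS AND PROOFS =====

-- adjacent differences of p :: l, proof-side description of B's pass
def diffsFrom (p : Int) : List Int → List Int
  | [] => []
  | a :: t => (a - p) :: diffsFrom a t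

-- A's indexed diffs plus wrap-around gap = adjacent diffs over the augmented list (zip form).
theorem diffs_eq (ys : List Int) (x : Int) (hne : ys ≠ []) :
    (PySem.List.pyRange 0 ((ys.length : Int) - 1) 1).map
        (fun i => PySem.List.pyGetD ys (i + 1) 0 - PySem.List.pyGetD ys i 0)
      ++ [x - PySem.List.pyGetD ys ((ys.length : Int) - 1) 0]
    = ((ys ++ [x]).zip (ys ++ [x]).tail).map (fun p => p.2 - p.1) := by
  induction ys with
  | nil => simp at hne
  | cons a t ih =>
    cases t with
    | nil =>
      simp [PySem.List.pyRange_one_eq_nil, PySem.List.pyGetD]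
    | cons b u =>
      have hshift : ∀ (i : Int), 0 ≤ i →
          PySem.List.pyGetD (a :: b :: u) (i + 1) 0 = PySem.List.pyGetD (b :: u) i 0 := by
        intro i hi
        obtain ⟨k, rfl⟩ : ∃ k : Nat, i = (k : Int) := ⟨i.toNat, by omega⟩
        have hk : ((k : Int) + 1) = (((k + 1 : Nat)) : Int) := by push_cast; ring
        rw [hk, PySem.List.pyGetD_natCast, PySem.List.pyGetD_natCast]
        simp [List.getD]
      have hb : (((a :: b :: u).length : Int) - 1) = (((b :: u).length : Nat) : Int) := by
        simp
      have hrange : PySem.List.pyRange 0 ((((b :: u).length : Nat) : Int)) 1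
          = 0 :: (PySem.List.pyRange 0 ((((b :: u).length : Nat) : Int) - 1) 1).map
              (fun i => i + 1) := by
        rw [PySem.List.pyRange_one_cons (by simp)]
        rw [PySem.List.pyRange_one, PySem.List.pyRange_one]
        have hnat : ((((b :: u).length : Nat) : Int) - (0 + 1)).toNat
            = ((((b :: u).length : Nat) : Int) - 1 - 0).toNat := by omega
        rw [hnat, List.map_map]
        refine congrArg (List.cons 0) (List.map_congr_left ?_)
        intro k _
        simp; ring
      rw [hb, hrange, List.map_cons, List.map_map]
      have hmap : (PySem.List.pyRange 0 ((((b :: u).length : Nat) : Int) - 1) 1).map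
            ((fun i => PySem.List.pyGetD (a :: b :: u) (i + 1) 0
              - PySem.List.pyGetD (a :: b :: u) i 0) ∘ fun i => i + 1)
          = (PySem.List.pyRange 0 ((((b :: u).length : Nat) : Int) - 1) 1).map
            (fun i => PySem.List.pyGetD (b :: u) (i + 1) 0 - PySem.List.pyGetD (b :: u) i 0) := by
        apply List.map_congr_left
        intro i hi
        have hi0 : 0 ≤ i := by
          have := (PySem.List.mem_pyRange_one (x := i)).1 hi
          omega
        simp only [Function.comp]
        rw [show i + 1 + 1 = (i + 1) + 1 from rfl, hshift (i + 1) (by omega), hshift i hi0]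
      rw [hmap]
      have hlast : PySem.List.pyGetD (a :: b :: u) ((((b :: u).length : Nat) : Int)) 0
          = PySem.List.pyGetD (b :: u) ((((b :: u).length : Nat) : Int) - 1) 0 := by
        have h1 : ((((b :: u).length : Nat) : Int)) = ((((b :: u).length : Nat) : Int) - 1) + 1 := by
          omega
        rw [h1, hshift _ (by simp)]
        norm_num
      have h0 : PySem.List.pyGetD (a :: b :: u) 0 0 = a := PySem.List.pyGetD_zero_cons a (b :: u) 0
      have h01 : PySem.List.pyGetD (a :: b :: u) (0 + 1) 0 = b := by
        rw [hshift 0 le_rfl]; exact PySem.List.pyGetD_zero_cons b u 0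
      rw [hlast, h0, h01]
      have key := ih (by simp)
      simp only [List.cons_append, List.tail_cons] at key
      simp only [List.cons_append, List.tail_cons, List.zip_cons_cons, List.map_cons]
      rw [key]

-- zip form = diffsFrom
theorem zip_diffs (a : Int) (t : List Int) :
    ((a :: t).zip t).map (fun p => p.2 - p.1) = diffsFrom a t := by
  induction t generalizing a with
  | nil => simp [diffsFrom]
  | cons b u ih => simp [diffsFrom, ih]

theorem getLastD_cons' (a p : Int) (t : List Int) : (a :: t).getLastD p = t.getLastD a := by
  cases t <;> simp [List.getLastD]

theorem diffsFrom_append_singleton (l : List Int) (p x : Int) :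
    diffsFrom p (l ++ [x]) = diffsFrom p l ++ [x - l.getLastD p] := by
  induction l generalizing p with
  | nil => simp [diffsFrom]
  | cons a t ih =>
    show (a - p) :: diffsFrom a (t ++ [x]) = ((a - p) :: diffsFrom a t) ++ [x - (a :: t).getLastD p]
    rw [ih, getLastD_cons']
    simp

-- descending-sorted lists are getD-antitone
theorem sorted_getD_le (lst : List Int) (hs : lst.Pairwise (fun a b => b ≤ a))
    (i j : Nat) (hij : i ≤ j) (hj : j < lst.length) :
    lst.getD j 0 ≤ lst.getD i 0 := by
  rcases Nat.eq_or_lt_of_le hij with rfl | hlt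
  · exact le_refl _
  · rw [List.getD_eq_getElem lst 0 hj, List.getD_eq_getElem lst 0 (lt_trans hlt hj)]
    exact List.pairwise_iff_getElem.1 hs i j (lt_trans hlt hj) hj hlt

theorem bisect_bounds (lst : List Int) (x : Int) (lo hi : Nat) (h : lo ≤ hi) :
    lo ≤ bisectDesc lst x lo hi ∧ bisectDesc lst x lo hi ≤ hi := by
  fun_induction bisectDesc lst x lo hi with
  | case1 lo hi hlt mid hle ih =>
    have hm : mid = (lo + hi) / 2 := rfl
    have := ih (by omega)
    omega
  | case2 lo hi hlt mid hgt ih =>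
    have hm : mid = (lo + hi) / 2 := rfl
    have := ih (by omega)
    omega
  | case3 lo hi hge => omega

theorem bisect_spec (lst : List Int) (x : Int)
    (hs : lst.Pairwise (fun a b => b ≤ a)) (lo hi : Nat)
    (h1 : lo ≤ hi) (h2 : hi ≤ lst.length)
    (hlo : ∀ j, j < lo → x ≤ lst.getD j 0)
    (hhi : ∀ j, hi ≤ j → j < lst.length → lst.getD j 0 < x) :
    (∀ j, j < bisectDesc lst x lo hi → x ≤ lst.getD j 0) ∧
    (∀ j, bisectDesc lst x lo hi ≤ j → j < lst.length → lst.getD j 0 < x) := by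
  fun_induction bisectDesc lst x lo hi with
  | case1 lo hi hlt mid hle ih =>
    have hm : mid = (lo + hi) / 2 := rfl
    refine ih (by omega) h2 ?_ hhi
    intro j hj
    have hjm : j ≤ mid := by omega
    have hmlen : mid < lst.length := by omega
    exact le_trans hle (sorted_getD_le lst hs j mid hjm hmlen)
  | case2 lo hi hlt mid hgt ih =>
    have hm : mid = (lo + hi) / 2 := rfl
    refine ih (by omega) (by omega) hlo ?_
    intro j hj hjlen
    have hmj : mid ≤ j := hj
    calc lst.getD j 0 ≤ lst.getD mid 0 := sorted_getD_le lst hs mid j hmj hjlen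
      _ < x := by omega
  | case3 lo hi hge =>
    exact ⟨hlo, fun j hj hjlen => hhi j (by omega) hjlen⟩

theorem insertDesc_eq (x : Int) (lst : List Int) :
    insertDesc x lst
      = lst.take (bisectDesc lst x 0 lst.length) ++ x :: lst.drop (bisectDesc lst x 0 lst.length) := by
  have hle : bisectDesc lst x 0 lst.length ≤ lst.length :=
    (bisect_bounds lst x 0 lst.length (Nat.zero_le _)).2
  unfold insertDesc
  exact PySem.List.insert_natCast lst _ x hle

theorem insertDesc_perm (x : Int) (l : List Int) : (insertDesc x l).Perm (x :: l) := by
  rw [insertDesc_eq]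
  have h := List.perm_middle (a := x) (l₁ := l.take (bisectDesc l x 0 l.length))
    (l₂ := l.drop (bisectDesc l x 0 l.length))
  rwa [List.take_append_drop] at h

theorem insertDesc_pairwise (x : Int) (l : List Int)
    (h : l.Pairwise (fun a b => b ≤ a)) :
    (insertDesc x l).Pairwise (fun a b => b ≤ a) := by
  obtain ⟨hA, hB⟩ := bisect_spec l x h 0 l.length (Nat.zero_le _) (le_refl _)
    (fun j hj => absurd hj (Nat.not_lt_zero j)) (fun j hj hjl => absurd hjl (by omega))
  set i := bisectDesc l x 0 l.length with hi
  have hil : i ≤ l.length := (bisect_bounds l x 0 l.length (Nat.zero_le _)).2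
  -- membership descriptions of the two halves
  have htake : ∀ a ∈ l.take i, x ≤ a := by
    intro a ha
    obtain ⟨j, hj, hja⟩ := List.mem_take_iff_getElem.1 ha
    have hji : j < i := lt_of_lt_of_le hj (le_trans (min_le_left _ _) (le_refl _))
    have := hA j hji
    rw [List.getD_eq_getElem l 0 (by omega)] at this
    omega
  have hdrop : ∀ a ∈ l.drop i, a < x := by
    intro a ha
    obtain ⟨k, hk, hka⟩ := List.mem_iff_getElem.1 ha
    rw [List.getElem_drop] at hka
    have hlen : i + k < l.length := by
      have := List.length_drop (l := l) (i := i); omega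
    have := hB (i + k) (Nat.le_add_right _ _) hlen
    rw [List.getD_eq_getElem l 0 hlen] at this
    omega
  rw [insertDesc_eq, ← hi]
  rw [List.pairwise_append]
  refine ⟨h.sublist (List.take_sublist i l), ?_, ?_⟩
  · rw [List.pairwise_cons]
    exact ⟨fun b hb => le_of_lt (hdrop b hb), h.sublist (List.drop_sublist i l)⟩
  · intro a ha b hb
    rcases List.mem_cons.1 hb with rfl | hb
    · exact htake a ha
    · exact le_trans (le_of_lt (hdrop b hb)) (htake a ha)

-- fold characterization: second component is the last element seen
theorem bFold_snd (l : List Int) (s : List Int) (p : Int) :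
    (l.foldl bStep (s, some p)).2 = some (l.getLastD p) := by
  induction l generalizing s p with
  | nil => rfl
  | cons a t ih =>
    simp only [List.foldl_cons, bStep]
    rw [ih, getLastD_cons']

-- fold characterization: first component is a permutation of s with the adjacent diffs inserted
theorem bFold_fst (l : List Int) (s : List Int) (p : Int) :
    ((l.foldl bStep (s, some p)).1).Perm (diffsFrom p l ++ s) := by
  induction l generalizing s p with
  | nil => simp [diffsFrom]
  | cons a t ih =>
    have h1 := ih (insertDesc (a - p) s) a
    have h2 : (insertDesc (a - p) s).Perm ((a - p) :: s) := insertDesc_perm _ _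
    have h3 : (diffsFrom a t ++ insertDesc (a - p) s).Perm
        (diffsFrom a t ++ (a - p) :: s) := List.Perm.append_left _ h2
    have h4 : (diffsFrom a t ++ (a - p) :: s).Perm ((a - p) :: (diffsFrom a t ++ s)) :=
      List.perm_middle
    have h5 : diffsFrom p (a :: t) ++ s = (a - p) :: (diffsFrom a t ++ s) := by
      simp [diffsFrom]
    rw [List.foldl_cons]
    have hb : bStep (s, some p) a = (insertDesc (a - p) s, some a) := rfl
    rw [hb, h5]
    exact h1.trans (h3.trans h4)

-- B's sorted accumulator stays descending-sorted
theorem bFold_sorted (l : List Int) (s : List Int) (p : Int)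
    (hs : s.Pairwise (fun a b => b ≤ a)) :
    ((l.foldl bStep (s, some p)).1).Pairwise (fun a b => b ≤ a) := by
  induction l generalizing s p with
  | nil => exact hs
  | cons a t ih =>
    simpa [bStep] using ih (insertDesc (a - p) s) a (insertDesc_pairwise _ _ hs)

theorem getGap_eq_alt (angles : List Int) (h : angles ≠ []) :
    getGap angles = getGap_alt angles := by
  obtain ⟨a, t, rfl⟩ : ∃ a t, angles = a :: t := by
    cases angles with
    | nil => exact absurd rfl h
    | cons a t => exact ⟨a, t, rfl⟩
  -- the unsorted gap list of A
  set first : Int := PySem.List.pyGetD (a :: t) 0 0 + 360 with hfirst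
  set G : List Int := diffsFrom a t ++ [first - t.getLastD a] with hG
  -- A's gap list equals G
  have hA : getGap (a :: t) = PySem.List.sorted G (fun x => x) true := by
    unfold getGap
    simp only [PySem.List.foldl_append_singleton_eq_map, List.nil_append]
    congr 1
    rw [diffs_eq (a :: t) first (by simp)]
    have hext : (a :: t) ++ [first] = a :: (t ++ [first]) := by simp
    rw [hext]
    have : (a :: (t ++ [first])).tail = t ++ [first] := rfl
    rw [this, zip_diffs a (t ++ [first]), diffsFrom_append_singleton]
  -- B's result
  have h0B : PySem.List.pyGetD (a :: t) 0 0 = a := PySem.List.pyGetD_zero_cons a t 0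
  have hBfold : (a :: t).foldl bStep ([], none) = t.foldl bStep ([], some a) := by
    simp [bStep]
  have hBdef : getGap_alt (a :: t)
      = insertDesc (first - t.getLastD a) (t.foldl bStep ([], some a)).1 := by
    show insertDesc (PySem.List.pyGetD (a :: t) 0 0 + 360
        - ((a :: t).foldl bStep ([], none)).2.getD 0) ((a :: t).foldl bStep ([], none)).1
      = _
    rw [hBfold, bFold_snd]
    simp [hfirst, h0B]
  -- both are descending-sorted permutations of G
  have hpermB : (getGap_alt (a :: t)).Perm G := by
    rw [hBdef]
    refine (insertDesc_perm _ _).trans ?_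
    have h1 := bFold_fst t [] a
    simp only [List.append_nil] at h1
    have h2 := h1.cons (first - t.getLastD a)
    have h3 : ((first - t.getLastD a) :: diffsFrom a t).Perm
        (diffsFrom a t ++ [first - t.getLastD a]) := by
      simpa using (List.perm_middle (l₁ := diffsFrom a t) (l₂ := ([] : List Int))).symm
    exact h2.trans h3

  have hsortB : (getGap_alt (a :: t)).Pairwise (fun x y => y ≤ x) := by
    rw [hBdef]
    exact insertDesc_pairwise _ _ (bFold_sorted t [] a (by simp))
  have hpermA : (getGap (a :: t)).Perm G := by
    rw [hA]; exact PySem.List.sorted_perm G (fun x => x) true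
  have hsortA : (getGap (a :: t)).Pairwise (fun x y => y ≤ x) := by
    rw [hA]
    have := PySem.List.sorted_pairwise_rev (xs := G) (key := fun x : Int => x)
    simpa using this
  exact List.Perm.eq_of_pairwise (fun a b _ _ h1 h2 => le_antisymm h2 h1)
    hsortA hsortB (hpermA.trans hpermB.symm)

-- ===== VERDICT (by name: the statement is the Claim_ definition above) =====
theorem getGap_spec : Claim_equal_getGap := by
  intro angles _ hpre
  exact getGap_eq_alt angles hpre
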